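-- pv_equiv track=rewrite | github.com/danihazan/share-with-ori | model_generation.py | check_row_deadlocks
-- ===== SOURCE A (Python) =====
-- def check_row_deadlocks(board):
--     rows = len(board)
--     cols = len(board[0])
--     deadlock_matrix = [[False for _ in range(cols)] for _ in range(rows)]
--
--     for i in range(rows):
--         start = -1  # Start of a potential deadlock segment
--         for j in range(cols):
--             if board[i][j] == '#':
--                 if start != -1:  # There was a segment before this wall
--                     if '.' not in board[i][start:j]:  # Check for no goals in the segment
--                         all_above_blocked = all(board[k][m] == '#' for m in range(start, j) for k in range(i))
--                         all_below_blocked = all(board[k][m] == '#' for m in range(start, j) for k in range(i+1, rows))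
--                         if all_above_blocked or all_below_blocked:
--                             for k in range(start, j):
--                                 deadlock_matrix[i][k] = True
--                 start = j + 1  # Update start to the position after the wall
--             elif board[i][j] == '.':
--                 start = -1  # Reset start because a goal disrupts the potential deadlock segment
--
--     return deadlock_matrix
-- ===== SOURCE B (Python) =====
-- def check_row_deadlocks(board):
--     rows = len(board)
--     cols = len(board[0])
--
--     # below[i][m]: every cell strictly below row i in column m is a wall.
--     # Built back-to-front in one O(rows*cols) pass.
--     below_rows = [None] * rows
--     below_rows[rows - 1] = [True] * cols
--     for i in range(rows - 2, -1, -1):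
--         prev = below_rows[i + 1]
--         nxt = board[i + 1]
--         below_rows[i] = [prev[m] and nxt[m] == '#' for m in range(cols)]
--
--     result = []
--     above = [True] * cols  # every cell strictly above row i in column m is a wall
--     for i in range(rows):
--         if i > 0:
--             prow = board[i - 1]
--             above = [above[m] and prow[m] == '#' for m in range(cols)]
--         below = below_rows[i]
--         out = [False] * cols
--         start = -1
--         seg_above = seg_below = True  # running 'all blocked' flags for the open segment
--         for j in range(cols):
--             c = board[i][j]
--             if c == '#':
--                 if start != -1 and (seg_above or seg_below):
--                     for k in range(start, j):
--                         out[k] = True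
--                 start = j + 1
--                 seg_above = seg_below = True
--             elif c == '.':
--                 start = -1
--             else:
--                 if start != -1:
--                     seg_above = seg_above and above[j]
--                     seg_below = seg_below and below[j]
--         result.append(out)
--     return result
-- ===== Notes on version B (the rewrite author's own statement) =====
-- stated objective: alternative
-- what changed: B replaces A's per-segment rescans (the '.'-in-slice test and the full above/below column scans repeated for every closed segment) with blocked-column tables precomputed in one backward pass plus running segment flags, so each row is decided in a single forward scan; the rescans disappear but the tables are always built, so the cost is comparable on typical boards.
import Mathlib
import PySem

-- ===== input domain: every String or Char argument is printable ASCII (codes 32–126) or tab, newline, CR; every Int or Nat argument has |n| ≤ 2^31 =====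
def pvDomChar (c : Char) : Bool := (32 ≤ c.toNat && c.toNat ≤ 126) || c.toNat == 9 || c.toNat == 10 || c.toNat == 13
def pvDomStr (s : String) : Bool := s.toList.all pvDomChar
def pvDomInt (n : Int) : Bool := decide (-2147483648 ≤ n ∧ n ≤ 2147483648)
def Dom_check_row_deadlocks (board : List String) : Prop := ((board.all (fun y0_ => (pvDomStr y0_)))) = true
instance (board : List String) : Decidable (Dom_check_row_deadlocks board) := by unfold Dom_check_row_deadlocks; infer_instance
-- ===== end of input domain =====

-- B replaces A's per-segment rescans (the '.'-in-slice test and the full column scans above/below the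
-- segment) by two precomputed blocked-column tables and two running segment flags, one forward scan per row.

-- board[k][m] with a default; exact for the in-range indices both programs actually use (Pre_)
def pvCell (board : List String) (k m : Int) : Char :=
  PySem.List.pyGetD (PySem.List.pyGetD board k "").toList m ' '

-- 'for k in range(start, j): deadlock_matrix[i][k] = True' — the same literal loop appears in A and in B
def pvMark (out : List Bool) (start j : Int) : List Bool :=
  (PySem.List.pyRange start j 1).foldl (fun o k => o.set k.toNat true) out

-- ===== PORT A =====
def aAllAbove (board : List String) (i start j : Int) : Bool :=
  (PySem.List.pyRange start j 1).all (fun m =>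
    (PySem.List.pyRange 0 i 1).all (fun k => pvCell board k m == '#'))

def aAllBelow (board : List String) (rows i start j : Int) : Bool :=
  (PySem.List.pyRange start j 1).all (fun m =>
    (PySem.List.pyRange (i + 1) rows 1).all (fun k => pvCell board k m == '#'))

def aStep (board : List String) (rows i : Int) (st : List Bool × Int) (j : Int) : List Bool × Int :=
  if pvCell board i j == '#' then
    if st.2 ≠ -1 then
      if !PySem.Chars.isIn ['.'] (PySem.List.slice (PySem.List.pyGetD board i "").toList (some st.2) (some j)) then
        if aAllAbove board i st.2 j || aAllBelow board rows i st.2 j then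
          (pvMark st.1 st.2 j, j + 1)
        else (st.1, j + 1)
      else (st.1, j + 1)
    else (st.1, j + 1)
  else if pvCell board i j == '.' then
    (st.1, -1)
  else st

-- deadlock_matrix[i] is written only during outer iteration i, so the outer loop is a map producing row i
def check_row_deadlocks (board : List String) : List (List Bool) :=
  let rows : Int := PySem.List.len board
  let cols : Int := PySem.Str.len (PySem.List.pyGetD board 0 "")
  (PySem.List.pyRange 0 rows 1).map (fun i =>
    ((PySem.List.pyRange 0 cols 1).foldl (aStep board rows i)
      ((PySem.List.pyRange 0 cols 1).map (fun _ => false), -1)).1)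

-- ===== PORT B =====
-- '[prev[m] and row[m] == '#' for m in range(cols)]'
def bAnd2 (prev : List Bool) (row : List Char) (cols : Nat) : List Bool :=
  (List.range cols).map (fun m => prev.getD m true && (row.getD m ' ' == '#'))

-- below_rows, built back-to-front (Source B's backward index loop, as structural recursion on the rows)
def bBelow (rows : List (List Char)) (cols : Nat) : List (List Bool) :=
  match rows with
  | [] => []
  | [_] => [List.replicate cols true]
  | _ :: r' :: rest =>
      let tailB := bBelow (r' :: rest) cols
      bAnd2 (tailB.headD []) r' cols :: tailB

-- the single forward scan of one row, carrying (out, start, seg_above, seg_below)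
def bStep (r : List Char) (above below : List Bool) (st : List Bool × Int × Bool × Bool) (jn : Nat) :
    List Bool × Int × Bool × Bool :=
  let c := r.getD jn ' '
  if c == '#' then
    ((if st.2.1 ≠ -1 ∧ (st.2.2.1 || st.2.2.2) = true then pvMark st.1 st.2.1 (jn : Int) else st.1),
      (jn : Int) + 1, true, true)
  else if c == '.' then (st.1, -1, st.2.2.1, st.2.2.2)
  else if st.2.1 ≠ -1 then
    (st.1, st.2.1, st.2.2.1 && above.getD jn true, st.2.2.2 && below.getD jn true)
  else st

def bRow (r : List Char) (above below : List Bool) (cols : Nat) : List Bool :=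
  ((List.range cols).foldl (bStep r above below) (List.replicate cols false, -1, true, true)).1

-- the outer forward loop: 'above' is updated from the previous row, 'below' rows are consumed in order
def bForward (rs : List (List Char)) (belows : List (List Bool)) (above : List Bool) (cols : Nat) :
    List (List Bool) :=
  match rs, belows with
  | r :: rest, bl :: blrest => bRow r above bl cols :: bForward rest blrest (bAnd2 above r cols) cols
  | _, _ => []

def check_row_deadlocks_alt (board : List String) : List (List Bool) :=
  let rs := board.map String.toList
  let cols := (rs.headD []).length
  bForward rs (bBelow rs cols) (List.replicate cols true) cols

-- ===== PRECONDITION & SPEC =====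
-- Pre_ excludes exactly the inputs where Python A raises: the empty board (board[0] → IndexError) and
-- boards with a row shorter than row 0 (board[i][j] → IndexError).
def Pre_check_row_deadlocks (board : List String) : Prop :=
  board ≠ [] ∧ ∀ s ∈ board, (board.headD "").toList.length ≤ s.toList.length
instance (board : List String) : Decidable (Pre_check_row_deadlocks board) := by
  unfold Pre_check_row_deadlocks; infer_instance
def pvWitness_check_row_deadlocks : List String := ["#x#", "###", "# ."]

def Spec_check_row_deadlocks (board : List String) (out : List (List Bool)) : Prop := out = check_row_deadlocks_alt board
instance (board : List String) (out : List (List Bool)) : Decidable (Spec_check_row_deadlocks board out) := by unfold Spec_check_row_deadlocks; infer_instance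

-- ===== CLAIM (what is proved, stated in full; the proofs are below) =====
def Claim_equal_check_row_deadlocks : Prop := ∀ (board : List String), Dom_check_row_deadlocks board → Pre_check_row_deadlocks board → Spec_check_row_deadlocks board (check_row_deadlocks board)

-- ===== LEMMAS AND PROOFS =====

-- column m is all '#' in each row of rs
def colAll (rs : List (List Char)) (m : Nat) : Bool := rs.all (fun r => r.getD m ' ' == '#')

-- reference shape of bBelow
def belowList (rs : List (List Char)) (cols : Nat) : List (List Bool) :=
  match rs with
  | [] => []
  | _ :: rest => (List.range cols).map (fun m => colAll rest m) :: belowList rest cols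

lemma getD_map_range_lt {α : Type} (f : Nat → α) (C m : Nat) (d : α) (h : m < C) :
    ((List.range C).map f).getD m d = f m := by
  rw [List.getD_eq_getElem?_getD]
  simp [h]

lemma bBelow_eq_belowList (rs : List (List Char)) (cols : Nat) :
    bBelow rs cols = belowList rs cols := by
  induction rs with
  | nil => rfl
  | cons r rest ih =>
    cases rest with
    | nil =>
      simp [bBelow, belowList, colAll]
    | cons r' rest' =>
      simp only [bBelow, belowList, ih]
      congr 1
      simp only [List.headD_cons]
      unfold bAnd2
      apply List.map_congr_left
      intro m hm
      rw [getD_map_range_lt _ _ _ _ (List.mem_range.mp hm)]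
      simp [colAll, Bool.and_comm]

-- pvCell through the char matrix
lemma pvCell_eq (board : List String) (k m : Nat) :
    pvCell board (k : Int) (m : Int) = ((board.map String.toList).getD k []).getD m ' ' := by
  unfold pvCell
  rw [PySem.List.pyGetD_natCast, PySem.List.pyGetD_natCast]
  by_cases hk : k < board.length
  · rw [List.getD_eq_getElem?_getD, List.getD_eq_getElem?_getD (l := board.map String.toList)]
    simp [List.getElem?_map, List.getElem?_eq_getElem hk]
  · rw [List.getD_eq_getElem?_getD, List.getD_eq_getElem?_getD (l := board.map String.toList)]
    simp [List.getElem?_eq_none (le_of_not_gt hk), List.getElem?_eq_none (l := board.map String.toList) (by simpa using le_of_not_gt hk)]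

-- all over a prefix of rows, as A computes it
lemma allAbove_eq (board : List String) (i s : Nat) (hi : i ≤ board.length) :
    (PySem.List.pyRange 0 (i : Int) 1).all (fun k => pvCell board k (s : Int) == '#') =
      colAll ((board.map String.toList).take i) s := by
  rw [PySem.List.pyRange_zero_nat, List.all_map]
  induction i with
  | zero => simp [colAll]
  | succ n ih =>
    have hn : n < board.length := by omega
    rw [List.range_succ, List.all_append, ih (by omega), List.take_add_one]
    simp only [colAll, List.all_append]
    congr 1
    have : pvCell board (n : Int) (s : Int) = ((board.map String.toList).getD n []).getD s ' ' := pvCell_eq board n s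
    simp [this, List.getElem?_eq_getElem (by simpa using hn : n < (board.map String.toList).length),
      List.getD_eq_getElem?_getD]

lemma allBelow_eq (board : List String) (i s : Nat) :
    (PySem.List.pyRange ((i : Int) + 1) (PySem.List.len board) 1).all
        (fun k => pvCell board k (s : Int) == '#') =
      colAll ((board.map String.toList).drop (i + 1)) s := by
  calc (PySem.List.pyRange ((i : Int) + 1) (PySem.List.len board) 1).all
        (fun k => pvCell board k (s : Int) == '#')
      = ((PySem.List.pyRange ((i : Int) + 1) (PySem.List.len board) 1).map
          (fun k => PySem.List.pyGetD board k "")).all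
          (fun r => PySem.List.pyGetD r.toList (s : Int) ' ' == '#') := by
        rw [List.all_map]; rfl
    _ = (board.drop ((i : Int) + 1).toNat).all (fun r => PySem.List.pyGetD r.toList (s : Int) ' ' == '#') := by
        rw [PySem.List.map_pyGetD_pyRange board "" (by omega)]
    _ = colAll ((board.map String.toList).drop (i + 1)) s := by
        have : ((i : Int) + 1).toNat = i + 1 := by omega
        rw [this, colAll, ← List.map_drop, List.all_map]
        apply List.all_congr rfl
        intro r
        simp [PySem.List.pyGetD_natCast]

-- A's nested all over the segment equals the all over the blocked-column predicate
lemma aAllAbove_eq (board : List String) (i s j : Nat) (hi : i ≤ board.length) :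
    aAllAbove board (i : Int) (s : Int) (j : Int) =
      (List.range' s (j - s)).all (fun m => colAll ((board.map String.toList).take i) m) := by
  unfold aAllAbove
  rw [PySem.List.pyRange_one, List.all_map, List.range'_eq_map_range, List.all_map]
  have : ((j : Int) - (s : Int)).toNat = j - s := by omega
  rw [this]
  apply List.all_congr rfl
  intro k
  have hcast : (s : Int) + (k : Int) = ((s + k : Nat) : Int) := by push_cast; ring
  simp only [Function.comp, hcast]
  exact allAbove_eq board i (s + k) hi

lemma aAllBelow_eq (board : List String) (i s j : Nat) :
    aAllBelow board (PySem.List.len board) (i : Int) (s : Int) (j : Int) =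
      (List.range' s (j - s)).all (fun m => colAll ((board.map String.toList).drop (i + 1)) m) := by
  unfold aAllBelow
  rw [PySem.List.pyRange_one, List.all_map, List.range'_eq_map_range, List.all_map]
  have : ((j : Int) - (s : Int)).toNat = j - s := by omega
  rw [this]
  apply List.all_congr rfl
  intro k
  have hcast : (s : Int) + (k : Int) = ((s + k : Nat) : Int) := by push_cast; ring
  simp only [Function.comp, hcast]
  exact allBelow_eq board i (s + k)

-- the '.'-free-slice test is decided by the scan invariant
lemma isIn_slice_false (Li : List Char) (s j : Nat)
    (h : ∀ t : Nat, s ≤ t → t < j → Li.getD t ' ' ≠ '.') :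
    PySem.Chars.isIn ['.'] (PySem.List.slice Li (some (s : Int)) (some (j : Int))) = false := by
  rw [PySem.List.slice_natCast]
  by_contra hc
  have htrue : PySem.Chars.isIn ['.'] (List.take (j - s) (List.drop s Li)) = true := by
    revert hc; cases PySem.Chars.isIn ['.'] (List.take (j - s) (List.drop s Li)) <;> simp
  have hmem : ('.' : Char) ∈ List.take (j - s) (List.drop s Li) := by
    have := (PySem.Chars.isIn_iff_infix ['.'] _).mp htrue
    exact (List.singleton_infix_iff _ _).mp this
  obtain ⟨t, ht, hval⟩ := List.mem_iff_getElem.mp hmem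
  have ht1 : t < j - s := lt_of_lt_of_le ht (by simp [List.length_take])
  have ht2 : s + t < Li.length := by
    have := ht; simp [List.length_take, List.length_drop] at this; omega
  have hdot : Li[s + t]'ht2 = '.' := by
    rw [← hval, List.getElem_take, List.getElem_drop]
  exact h (s + t) (by omega) (by omega) (by
    rw [List.getD_eq_getElem?_getD, List.getElem?_eq_getElem ht2]; simpa using hdot)

-- board[i] as a char row
lemma row_toList_eq (board : List String) (i : Nat) :
    (PySem.List.pyGetD board (i : Int) "").toList = (board.map String.toList).getD i [] := by
  rw [PySem.List.pyGetD_natCast]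
  by_cases hk : i < board.length
  · rw [List.getD_eq_getElem?_getD, List.getD_eq_getElem?_getD (l := board.map String.toList)]
    simp [List.getElem?_eq_getElem hk]
  · rw [List.getD_eq_getElem?_getD, List.getD_eq_getElem?_getD (l := board.map String.toList)]
    simp [List.getElem?_eq_none (le_of_not_gt hk), List.getElem?_eq_none (l := board.map String.toList) (by simpa using le_of_not_gt hk)]

-- the per-row loop invariant
def pvInvRow (Li : List Char) (A B : Nat → Bool) (start : Int) (j0 : Nat) (segA segB : Bool) : Prop :=
  start ≠ -1 → ∃ s : Nat, start = (s : Int) ∧ s ≤ j0 ∧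
    (∀ t : Nat, s ≤ t → t < j0 → Li.getD t ' ' ≠ '.') ∧
    segA = (List.range' s (j0 - s)).all A ∧
    segB = (List.range' s (j0 - s)).all B

-- the main per-row equivalence: A's scan and B's scan agree from related states
lemma loop_eq (board : List String) (i : Nat) (hi : i < board.length) (C : Nat) :
    ∀ (c j0 : Nat), j0 + c ≤ C →
    ∀ (drow : List Bool) (start : Int) (segA segB : Bool),
    pvInvRow ((board.map String.toList).getD i [])
        (fun m => colAll ((board.map String.toList).take i) m)
        (fun m => colAll ((board.map String.toList).drop (i + 1)) m) start j0 segA segB →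
    ((List.range' j0 c).foldl (fun st (jn : Nat) => aStep board (PySem.List.len board) (i : Int) st (jn : Int)) (drow, start)).1 =
    ((List.range' j0 c).foldl
        (bStep ((board.map String.toList).getD i [])
          ((List.range C).map (fun m => colAll ((board.map String.toList).take i) m))
          ((List.range C).map (fun m => colAll ((board.map String.toList).drop (i + 1)) m)))
        (drow, start, segA, segB)).1 := by
  intro c
  induction c with
  | zero => intro j0 _ drow start segA segB _; rfl
  | succ c ih =>
    intro j0 hj drow start segA segB hinv
    rw [List.range'_succ, List.foldl_cons, List.foldl_cons]
    have hj0C : j0 < C := by omega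
    set L := board.map String.toList with hL
    set Li := L.getD i [] with hLi
    set Af := (fun m => colAll (L.take i) m) with hAf
    set Bf := (fun m => colAll (L.drop (i + 1)) m) with hBf
    have hcell : pvCell board (i : Int) (j0 : Int) = Li.getD j0 ' ' := pvCell_eq board i j0
    have hrow : (PySem.List.pyGetD board (i : Int) "").toList = Li := row_toList_eq board i
    have hcast1 : (j0 : Int) + 1 = ((j0 + 1 : Nat) : Int) := by push_cast; ring
    -- invariant that holds after closing/opening at a wall at j0
    have hfresh : pvInvRow Li Af Bf ((j0 : Int) + 1) (j0 + 1) true true := by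
      intro _
      exact ⟨j0 + 1, hcast1, le_refl _, fun t h1 h2 => absurd h2 (by omega),
        by simp, by simp⟩
    by_cases hsharp : Li.getD j0 ' ' = '#'
    · -- wall: both close the segment
      have hsharp' : Li[j0]?.getD ' ' = '#' := hsharp
      by_cases hneg : start = -1
      · have ha : aStep board (PySem.List.len board) (i : Int) (drow, start) (j0 : Int) = (drow, (j0 : Int) + 1) := by
          simp [aStep, hcell, hsharp', hneg]
        have hb : bStep Li ((List.range C).map Af) ((List.range C).map Bf) (drow, start, segA, segB) j0 = (drow, (j0 : Int) + 1, true, true) := by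
          simp [bStep, hsharp', hneg]
        rw [ha, hb]
        exact ih (j0 + 1) (by omega) drow ((j0 : Int) + 1) true true hfresh
      · obtain ⟨sn, hsn, hsle, hdots, hsegA, hsegB⟩ := hinv hneg
        have hAB : (aAllAbove board (i : Int) start (j0 : Int) || aAllBelow board (PySem.List.len board) (i : Int) start (j0 : Int)) = (segA || segB) := by
          rw [hsn, aAllAbove_eq board i sn j0 (le_of_lt hi), aAllBelow_eq board i sn j0, hsegA, hsegB]
        have hisin : PySem.Chars.isIn ['.'] (PySem.List.slice Li (some start) (some (j0 : Int))) = false := by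
          rw [hsn]; exact isIn_slice_false Li sn j0 hdots
        have ha : aStep board (PySem.List.len board) (i : Int) (drow, start) (j0 : Int)
            = (if segA || segB then pvMark drow start (j0 : Int) else drow, (j0 : Int) + 1) := by
          simp only [aStep, hcell, hrow]
          rw [if_pos (by simp [hsharp'])]
          rw [if_pos (by simpa using hneg), hisin, hAB]
          cases hc : segA || segB <;> simp
        have hb : bStep Li ((List.range C).map Af) ((List.range C).map Bf) (drow, start, segA, segB) j0
            = (if segA || segB then pvMark drow start (j0 : Int) else drow, (j0 : Int) + 1, true, true) := by
          simp only [bStep]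
          rw [if_pos (by simp [hsharp'])]
          cases hc : segA || segB
          · rw [if_neg (by simp)]; simp
          · rw [if_pos (by simp [hneg])]; simp
        rw [ha, hb]
        cases hc : segA || segB
        · simp only [if_neg (by simp : ¬ (false = true))]
          exact ih (j0 + 1) (by omega) drow ((j0 : Int) + 1) true true hfresh
        · exact ih (j0 + 1) (by omega) _ ((j0 : Int) + 1) true true hfresh
    · have hsharp' : ¬ Li[j0]?.getD ' ' = '#' := hsharp
      by_cases hdot : Li.getD j0 ' ' = '.'
      · -- goal: both reset start to -1
        have hdot' : Li[j0]?.getD ' ' = '.' := hdot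
        have ha : aStep board (PySem.List.len board) (i : Int) (drow, start) (j0 : Int) = (drow, -1) := by
          simp [aStep, hcell, hdot']
        have hb : bStep Li ((List.range C).map Af) ((List.range C).map Bf) (drow, start, segA, segB) j0 = (drow, -1, segA, segB) := by
          simp [bStep, hdot']
        rw [ha, hb]
        refine ih (j0 + 1) (by omega) drow (-1) segA segB ?_
        intro hcontra; exact absurd rfl hcontra
      · -- ordinary cell: A keeps its state, B extends the running flags
        have hdot' : ¬ Li[j0]?.getD ' ' = '.' := hdot
        have ha : aStep board (PySem.List.len board) (i : Int) (drow, start) (j0 : Int) = (drow, start) := by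
          simp [aStep, hcell, hsharp', hdot']
        by_cases hneg : start = -1
        · have hb : bStep Li ((List.range C).map Af) ((List.range C).map Bf) (drow, start, segA, segB) j0 = (drow, start, segA, segB) := by
            simp [bStep, hsharp', hdot', hneg]
          rw [ha, hb]
          refine ih (j0 + 1) (by omega) drow start segA segB ?_
          intro hcontra; exact absurd hneg hcontra
        · obtain ⟨sn, hsn, hsle, hdots, hsegA, hsegB⟩ := hinv hneg
          have hb : bStep Li ((List.range C).map Af) ((List.range C).map Bf) (drow, start, segA, segB) j0
              = (drow, start, segA && Af j0, segB && Bf j0) := by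
            simp only [bStep]
            rw [if_neg (by simp [hsharp']), if_neg (by simp [hdot']), if_pos (by simpa using hneg)]
            rw [getD_map_range_lt Af C j0 true hj0C, getD_map_range_lt Bf C j0 true hj0C]
          rw [ha, hb]
          refine ih (j0 + 1) (by omega) drow start (segA && Af j0) (segB && Bf j0) ?_
          intro _
          have hrange : List.range' sn (j0 + 1 - sn) = List.range' sn (j0 - sn) ++ [j0] := by
            have h1 : j0 + 1 - sn = (j0 - sn) + 1 := by omega
            rw [h1, List.range'_concat]
            congr 2
            omega
          refine ⟨sn, hsn, by omega, ?_, ?_, ?_⟩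
          · intro t h1 h2
            by_cases ht : t = j0
            · subst ht; exact hdot
            · exact hdots t h1 (by omega)
          · rw [hrange, List.all_append, hsegA]; simp
          · rw [hrange, List.all_append, hsegB]; simp

-- B unrolled to a map over row indices
lemma bForward_eq (C : Nat) :
    ∀ (rest pref : List (List Char)),
    bForward rest (belowList rest C) ((List.range C).map (fun m => colAll pref m)) C =
      (List.range rest.length).map (fun t =>
        bRow (rest.getD t [])
          ((List.range C).map (fun m => colAll (pref ++ rest.take t) m))
          ((List.range C).map (fun m => colAll (rest.drop (t + 1)) m)) C) := by
  intro rest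
  induction rest with
  | nil => intro pref; rfl
  | cons r rest ih =>
    intro pref
    have hAnd : bAnd2 ((List.range C).map (fun m => colAll pref m)) r C
        = (List.range C).map (fun m => colAll (pref ++ [r]) m) := by
      unfold bAnd2
      apply List.map_congr_left
      intro m hm
      rw [getD_map_range_lt _ _ _ _ (List.mem_range.mp hm)]
      simp [colAll, List.all_append]
    simp only [belowList, bForward, List.length_cons, List.range_succ_eq_map, List.map_cons,
      List.map_map]
    congr 1
    · simp [colAll]
    · rw [hAnd, ih (pref ++ [r])]
      apply List.map_congr_left
      intro t _
      simp only [Function.comp, List.getD_cons_succ, List.take_succ_cons, List.drop_succ_cons,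
        List.append_assoc, List.cons_append, List.nil_append]

-- the two ports agree on every board
lemma main_eq (board : List String) : check_row_deadlocks board = check_row_deadlocks_alt board := by
  unfold check_row_deadlocks check_row_deadlocks_alt
  set L := board.map String.toList with hLdef
  set C := (L.headD []).length with hCdef
  have hlen : PySem.List.len board = (board.length : Int) := by simp
  have hrow0 : (PySem.List.pyGetD board 0 "").toList = L.headD [] := by
    rw [PySem.List.pyGetD_zero]
    cases board <;> simp [hLdef]
  have hcols : PySem.Str.len (PySem.List.pyGetD board 0 "") = (C : Int) := by
    rw [PySem.Str.len_eq, hrow0, hCdef]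
  simp only [hlen, hcols]
  rw [ PySem.List.pyRange_zero_nat board.length, PySem.List.pyRange_zero_nat C,
    List.map_map]
  have hinit : List.map (fun _ => false) (List.map (fun k : Nat => (k : Int)) (List.range C)) = List.replicate C false := by
    rw [List.map_map]
    simp
  have habove0 : (List.replicate C true) = (List.range C).map (fun m => colAll ([] : List (List Char)) m) := by
    simp [colAll]
  rw [bBelow_eq_belowList, habove0, bForward_eq C L []]
  have hLlen : L.length = board.length := by simp [hLdef]
  rw [hLlen]
  apply List.map_congr_left
  intro i hi
  have hi' : i < board.length := List.mem_range.mp hi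
  simp only [Function.comp]
  rw [hinit, List.foldl_map]
  unfold bRow
  rw [List.range_eq_range']
  exact (loop_eq board i hi' C C 0 (by omega) (List.replicate C false) (-1) true true
    (fun hcontra => absurd rfl hcontra)).trans (by simp [hLdef, List.range_eq_range'])

-- ===== VERDICT (by name: the statement is the Claim_ definition above) =====
theorem check_row_deadlocks_spec : Claim_equal_check_row_deadlocks := by
  intro board _ _
  exact main_eq board
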